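-- pv_equiv track=rewrite | github.com/derek809/Google-Drive-DB | core/context_manager.py | _detect_topic_switch
-- ===== SOURCE A (Python) =====
-- def _detect_topic_switch(text_lower: str) -> bool:
--     """Detect phrases like 'actually about that other thing'."""
--     switch_phrases = [
--         "actually about",
--         "about that other",
--         "back to the",
--         "going back to",
--         "the other thing",
--         "never mind that",
--         "forget that",
--     ]
--     return any(phrase in text_lower for phrase in switch_phrases)
-- ===== SOURCE B (Python) =====
-- _SWITCH_PHRASES = (
--     "actually about",
--     "about that other",
--     "back to the",
--     "going back to",
--     "the other thing",
--     "never mind that",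
--     "forget that",
-- )
--
--
-- def _detect_topic_switch(text_lower: str) -> bool:
--     # Single left-to-right scan: at each position try all phrases as prefixes.
--     return any(
--         text_lower.startswith(phrase, i)
--         for i in range(len(text_lower) + 1)
--         for phrase in _SWITCH_PHRASES
--     )
-- ===== Notes on version B (the rewrite author's own statement) =====
-- stated objective: alternative
-- what changed: Replaces seven independent whole-text substring searches (one per phrase) with a single left-to-right scan over the text positions that tries every phrase as a prefix at each position, the hand-rolled form of one alternation-regex scan.
import Mathlib
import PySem

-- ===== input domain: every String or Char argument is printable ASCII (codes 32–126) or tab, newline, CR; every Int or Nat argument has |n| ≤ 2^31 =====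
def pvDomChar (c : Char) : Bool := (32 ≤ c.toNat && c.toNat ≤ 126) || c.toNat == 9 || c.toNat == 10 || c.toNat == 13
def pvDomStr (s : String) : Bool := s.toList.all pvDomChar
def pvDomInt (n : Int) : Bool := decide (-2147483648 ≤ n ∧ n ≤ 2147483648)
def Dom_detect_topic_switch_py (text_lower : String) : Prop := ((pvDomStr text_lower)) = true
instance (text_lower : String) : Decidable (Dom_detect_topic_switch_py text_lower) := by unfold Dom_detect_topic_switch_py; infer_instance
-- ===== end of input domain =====

-- B replaces seven independent substring searches with one left-to-right scan over text
-- positions trying every phrase as a prefix at each position (objective: alternative).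

-- ===== PORT A =====
-- the literal phrase list of A
def pvSwitchPhrases : List String :=
  ["actually about", "about that other", "back to the", "going back to",
   "the other thing", "never mind that", "forget that"]

-- any(phrase in text_lower for phrase in switch_phrases)
def detect_topic_switch_py (text_lower : String) : Bool :=
  pvSwitchPhrases.any (fun phrase => PySem.Str.isIn phrase text_lower)

-- ===== PORT B =====
-- any(text_lower.startswith(phrase, i) for i in range(len(text_lower)+1) for phrase in _SWITCH_PHRASES);
-- text_lower.startswith(phrase, i) is PySem.Chars.startswith on the suffix starting at i (exact for 0 ≤ i ≤ len)
def detect_topic_switch_py_alt (text_lower : String) : Bool :=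
  (List.range (text_lower.toList.length + 1)).any (fun i =>
    pvSwitchPhrases.any (fun phrase =>
      PySem.Chars.startswith (text_lower.toList.drop i) phrase.toList))

-- ===== PRECONDITION & SPEC =====
def Spec_detect_topic_switch_py (text_lower : String) (out : Bool) : Prop := out = detect_topic_switch_py_alt text_lower
instance (text_lower : String) (out : Bool) : Decidable (Spec_detect_topic_switch_py text_lower out) := by unfold Spec_detect_topic_switch_py; infer_instance

-- ===== CLAIM (what is proved, stated in full; the proofs are below) =====
def Claim_equal_detect_topic_switch_py : Prop := ∀ (text_lower : String), Dom_detect_topic_switch_py text_lower → Spec_detect_topic_switch_py text_lower (detect_topic_switch_py text_lower)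

-- ===== LEMMAS AND PROOFS =====

-- for a nonempty pattern, "some position ≤ length where it is a prefix" is exactly substring membership
theorem pv_scan_eq_isIn (p s : List Char) (hp : p ≠ []) :
    ((List.range (s.length + 1)).any (fun i => PySem.Chars.startswith (s.drop i) p))
      = PySem.Chars.isIn p s := by
  rw [Bool.eq_iff_iff]
  simp only [List.any_eq_true, List.mem_range, PySem.Chars.startswith,
    List.isPrefixOf_iff_prefix]
  rw [← PySem.Chars.exists_prefix_drop_iff_isIn]
  constructor
  · rintro ⟨i, _, h⟩; exact ⟨i, h⟩
  · rintro ⟨j, h⟩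
    refine ⟨j, ?_, h⟩
    by_contra hj
    have : s.drop j = [] := List.drop_eq_nil_of_le (by omega)
    rw [this] at h
    exact hp (List.prefix_nil.mp h)

-- any respects pointwise equality on members of the list
theorem pv_any_congr_mem {α : Type} (l : List α) (f g : α → Bool)
    (h : ∀ x ∈ l, f x = g x) : l.any f = l.any g := by
  induction l with
  | nil => rfl
  | cons a t ih => simp_all [List.any_cons]

-- swap the two any-quantifiers: scanning positions outer or phrases outer is the same test
theorem pv_any_swap {α β : Type} (xs : List α) (ys : List β) (f : α → β → Bool) :
    (xs.any fun i => ys.any fun p => f i p) = (ys.any fun p => xs.any fun i => f i p) := by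
  rw [Bool.eq_iff_iff]; simp only [List.any_eq_true]; tauto

-- ===== VERDICT (by name: the statement is the Claim_ definition above) =====
theorem detect_topic_switch_py_spec : Claim_equal_detect_topic_switch_py := by
  intro t _
  unfold Spec_detect_topic_switch_py detect_topic_switch_py detect_topic_switch_py_alt
  rw [pv_any_swap]
  refine (pv_any_congr_mem _ _ _ fun p hp => ?_).symm
  rw [pv_scan_eq_isIn p.toList t.toList (by fin_cases hp <;> decide)]
  simp [PySem.Str.isIn]
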